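-- pv_equiv track=rewrite | github.com/madrid-born/RSA-Implementation | BigPower.py | in_decimal
-- ===== SOURCE A (Python) =====
-- def in_decimal(array):
--     k = 1
--     result = 0
--     for digit in array:
--         if digit == 1:
--             result += k
--         k = k * 2
--     return result
-- ===== SOURCE B (Python) =====
-- def in_decimal(array):
--     result = 0
--     for digit in reversed(array):
--         result = result * 2 + (1 if digit == 1 else 0)
--     return result
-- ===== Notes on version B (the rewrite author's own statement) =====
-- stated objective: faster
-- what changed: B replaces A's running power-of-two accumulator with Horner's method over the reversed list (MSB first): a single shifting accumulator instead of maintaining a separate big-integer power k=2^i and adding it in.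
import Mathlib
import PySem

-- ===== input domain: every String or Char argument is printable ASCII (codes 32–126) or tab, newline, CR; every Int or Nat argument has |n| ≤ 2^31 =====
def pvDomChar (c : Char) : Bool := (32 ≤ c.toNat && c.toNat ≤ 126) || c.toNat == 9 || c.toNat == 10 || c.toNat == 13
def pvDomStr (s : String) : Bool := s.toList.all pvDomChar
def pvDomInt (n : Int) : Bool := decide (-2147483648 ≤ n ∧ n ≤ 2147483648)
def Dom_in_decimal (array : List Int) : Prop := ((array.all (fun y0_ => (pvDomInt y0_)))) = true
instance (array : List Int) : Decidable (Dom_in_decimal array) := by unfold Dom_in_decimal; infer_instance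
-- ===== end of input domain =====

-- B rewrites A's running power-of-two accumulation as Horner's method over the reversed list (idiomatic MSB-first fold).


-- ===== PORT A =====
-- state (k, result); result updated with the old k, then k doubled — as in the Python loop
def in_decimal (array : List Int) : Int :=
  (array.foldl (fun (st : Int × Int) digit =>
      (st.1 * 2, if digit == 1 then st.2 + st.1 else st.2)) (1, 0)).2

-- ===== PORT B =====
def in_decimal_alt (array : List Int) : Int :=
  array.reverse.foldl (fun result digit => result * 2 + (if digit == 1 then 1 else 0)) 0

-- ===== PRECONDITION & SPEC =====
def Spec_in_decimal (array : List Int) (out : Int) : Prop := out = in_decimal_alt array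
instance (array : List Int) (out : Int) : Decidable (Spec_in_decimal array out) := by unfold Spec_in_decimal; infer_instance

-- ===== CLAIM (what is proved, stated in full; the proofs are below) =====
def Claim_equal_in_decimal : Prop := ∀ (array : List Int), Dom_in_decimal array → Spec_in_decimal array (in_decimal array)

-- ===== LEMMAS AND PROOFS =====
-- reference value of an LSB-first bit list
def pvVal (l : List Int) : Int :=
  match l with
  | [] => 0
  | d :: t => (if d == 1 then 1 else 0) + 2 * pvVal t

theorem in_decimal_A_gen (l : List Int) (k r : Int) :
    (l.foldl (fun (st : Int × Int) digit =>
      (st.1 * 2, if digit == 1 then st.2 + st.1 else st.2)) (k, r)).2 = r + k * pvVal l := by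
  induction l generalizing k r with
  | nil => simp [pvVal]
  | cons d t ih =>
    simp only [List.foldl_cons, pvVal, ih]
    split <;> ring

theorem in_decimal_B_val (l : List Int) : in_decimal_alt l = pvVal l := by
  unfold in_decimal_alt
  rw [List.foldl_reverse]
  induction l with
  | nil => simp [pvVal]
  | cons d t ih =>
    simp only [List.foldr_cons, pvVal, ih]
    ring

-- ===== VERDICT (by name: the statement is the Claim_ definition above) =====
theorem in_decimal_spec : Claim_equal_in_decimal := by
  intro array _
  unfold Spec_in_decimal in_decimal
  rw [in_decimal_A_gen, in_decimal_B_val]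
  ring
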